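-- pv_equiv track=rewrite | github.com/nccongg/Sokoban-UI | algorithms/UCS.py | calculate_grid_cost
-- ===== SOURCE A (Python) =====
-- def calculate_grid_cost(grid, stone_weights):
--     grid_cost = []
--     weight_index = 0
--
--     for r in range(len(grid)):
--         row_cost = []
--         for c in range(len(grid[r])):
--             if grid[r][c] == '$' or grid[r][c] == '*':
--                 row_cost.append(stone_weights[weight_index])
--                 weight_index += 1
--             else:
--                 row_cost.append(0)
--         grid_cost.append(row_cost)
--
--     return grid_cost
-- ===== SOURCE B (Python) =====
-- def calculate_grid_cost(grid, stone_weights):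
--     positions = [(r, c) for r, row in enumerate(grid)
--                  for c, cell in enumerate(row) if cell == '$' or cell == '*']
--     weight_at = {pos: stone_weights[i] for i, pos in enumerate(positions)}
--     return [[weight_at.get((r, c), 0) for c in range(len(row))]
--             for r, row in enumerate(grid)]
-- ===== Notes on version B (the rewrite author's own statement) =====
-- stated objective: alternative
-- what changed: Replaces the single stateful pass threading a running weight_index through nested loops by an index-table approach: one pass collects stone coordinates, a dict maps each position to its weight by enumeration index, and a second lookup pass builds the cost grid.
import Mathlib
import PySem

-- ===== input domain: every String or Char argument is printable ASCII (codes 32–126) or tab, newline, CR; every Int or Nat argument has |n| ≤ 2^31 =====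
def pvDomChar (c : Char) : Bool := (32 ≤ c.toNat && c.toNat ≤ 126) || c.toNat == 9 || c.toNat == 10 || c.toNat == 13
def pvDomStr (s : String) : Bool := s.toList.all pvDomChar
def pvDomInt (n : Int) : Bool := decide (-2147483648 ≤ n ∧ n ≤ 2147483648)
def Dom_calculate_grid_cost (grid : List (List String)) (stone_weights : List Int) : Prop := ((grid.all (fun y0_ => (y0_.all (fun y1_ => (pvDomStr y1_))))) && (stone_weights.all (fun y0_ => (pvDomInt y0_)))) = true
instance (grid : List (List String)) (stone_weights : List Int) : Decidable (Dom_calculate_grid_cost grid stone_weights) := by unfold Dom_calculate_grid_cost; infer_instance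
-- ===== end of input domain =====

-- B replaces A's single stateful pass (running weight_index) by a positions-list + position->weight
-- dict built first, then a lookup pass; same cost, different decomposition ("alternative").


-- ===== PORT A =====
def calculate_grid_cost (grid : List (List String)) (stone_weights : List Int) : List (List Int) :=
  ((PySem.List.pyRange 0 grid.length 1).foldl
    (fun (st : List (List Int) × Int) r =>
      let row := PySem.List.pyGetD grid r []
      let inner := (PySem.List.pyRange 0 row.length 1).foldl
        (fun (rc : List Int × Int) c =>
          let cell := PySem.List.pyGetD row c ""
          if cell = "$" ∨ cell = "*" then
            (rc.1 ++ [(PySem.List.pyGet? stone_weights rc.2).getD 0], rc.2 + 1)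
          else
            (rc.1 ++ [0], rc.2))
        ([], st.2)
      (st.1 ++ [inner.1], inner.2))
    ([], 0)).1

-- ===== PORT B =====
def calculate_grid_cost_alt (grid : List (List String)) (stone_weights : List Int) : List (List Int) :=
  let positions : List (Int × Int) :=
    (PySem.List.enumerate grid 0).flatMap (fun q =>
      (PySem.List.enumerate q.2 0).filterMap (fun p =>
        if p.2 = "$" ∨ p.2 = "*" then some (q.1, p.1) else none))
  let weight_at : PySem.Dict (Int × Int) Int :=
    (PySem.List.enumerate positions 0).foldl
      (fun d ip => d.insert ip.2 ((PySem.List.pyGet? stone_weights ip.1).getD 0))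
      PySem.Dict.empty
  (PySem.List.enumerate grid 0).map (fun q =>
    (PySem.List.pyRange 0 q.2.length 1).map (fun c => weight_at.getD (q.1, c) 0))

-- ===== PRECONDITION & SPEC =====
-- Pre_ excludes exactly the inputs where the grid has more stone cells ('$'/'*') than
-- stone_weights has entries: there Python A raises IndexError (stone_weights[weight_index]).
def Pre_calculate_grid_cost (grid : List (List String)) (stone_weights : List Int) : Prop :=
  (grid.map (fun row => row.countP (fun cell => cell == "$" || cell == "*"))).sum ≤ stone_weights.length
instance (grid : List (List String)) (stone_weights : List Int) : Decidable (Pre_calculate_grid_cost grid stone_weights) := by unfold Pre_calculate_grid_cost; infer_instance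
def pvWitness_calculate_grid_cost : List (List String) × List Int := ([["$", "."], [".", "*"]], [3, 5])

def Spec_calculate_grid_cost (grid : List (List String)) (stone_weights : List Int) (out : List (List Int)) : Prop := out = calculate_grid_cost_alt grid stone_weights
instance (grid : List (List String)) (stone_weights : List Int) (out : List (List Int)) : Decidable (Spec_calculate_grid_cost grid stone_weights out) := by unfold Spec_calculate_grid_cost; infer_instance

-- ===== CLAIM (what is proved, stated in full; the proofs are below) =====
def Claim_equal_calculate_grid_cost : Prop := ∀ (grid : List (List String)) (stone_weights : List Int), Dom_calculate_grid_cost grid stone_weights → Pre_calculate_grid_cost grid stone_weights → Spec_calculate_grid_cost grid stone_weights (calculate_grid_cost grid stone_weights)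

-- ===== LEMMAS AND PROOFS =====

-- the weight both ports read at index i
def pvWget (w : List Int) (i : Int) : Int := (PySem.List.pyGet? w i).getD 0

def pvCnt (row : List String) : Nat := row.countP (fun cell => decide (cell = "$" ∨ cell = "*"))

-- reference result: one row, weights consumed from index k on
def pvRefRow (w : List Int) : Int → List String → List Int
  | _, [] => []
  | k, cell :: cs =>
    if cell = "$" ∨ cell = "*" then pvWget w k :: pvRefRow w (k + 1) cs
    else 0 :: pvRefRow w k cs

def pvRef (w : List Int) : Int → List (List String) → List (List Int)
  | _, [] => []
  | k, row :: rest => pvRefRow w k row :: pvRef w (k + (pvCnt row : Int)) rest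

-- scan-order stone positions, rows numbered from r0, columns from c0
def pvPosCells (r : Int) : Int → List String → List (Int × Int)
  | _, [] => []
  | c0, cell :: cs =>
    if cell = "$" ∨ cell = "*" then (r, c0) :: pvPosCells r (c0 + 1) cs
    else pvPosCells r (c0 + 1) cs

def pvPos : Int → List (List String) → List (Int × Int)
  | _, [] => []
  | r0, row :: rest => pvPosCells r0 0 row ++ pvPos (r0 + 1) rest

-- association-list segments (position, weight), weight indices from k
def pvSegCells (w : List Int) (r : Int) : Int → Int → List String → List ((Int × Int) × Int)
  | _, _, [] => []
  | c0, k, cell :: cs =>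
    if cell = "$" ∨ cell = "*" then ((r, c0), pvWget w k) :: pvSegCells w r (c0 + 1) (k + 1) cs
    else pvSegCells w r (c0 + 1) k cs

def pvSeg (w : List Int) : Int → Int → List (List String) → List ((Int × Int) × Int)
  | _, _, [] => []
  | r0, k, row :: rest => pvSegCells w r0 0 k row ++ pvSeg w (r0 + 1) (k + (pvCnt row : Int)) rest

-- first-match lookup with default 0 (what a dict of distinct keys computes)
def pvLk : List ((Int × Int) × Int) → (Int × Int) → Int
  | [], _ => 0
  | q :: t, key => if q.1 = key then q.2 else pvLk t key

-- ---- A side: the nested stateful fold produces pvRef ----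

theorem pv_rowA (w : List Int) (row : List String) : ∀ (acc : List Int) (k : Int),
    row.foldl (fun (rc : List Int × Int) cell =>
      if cell = "$" ∨ cell = "*" then (rc.1 ++ [pvWget w rc.2], rc.2 + 1)
      else (rc.1 ++ [0], rc.2)) (acc, k)
    = (acc ++ pvRefRow w k row, k + (pvCnt row : Int)) := by
  induction row with
  | nil => intro acc k; simp [pvRefRow, pvCnt]
  | cons cell cs ih =>
    intro acc k
    by_cases h : cell = "$" ∨ cell = "*" <;>
      simp [List.foldl_cons, h, ih, pvRefRow, pvCnt]
    ring_nf

theorem pv_rowA' (w : List Int) (row : List String) (acc : List Int) (k : Int) :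
    (PySem.List.pyRange 0 row.length 1).foldl
      (fun (rc : List Int × Int) c =>
        let cell := PySem.List.pyGetD row c ""
        if cell = "$" ∨ cell = "*" then (rc.1 ++ [(PySem.List.pyGet? w rc.2).getD 0], rc.2 + 1)
        else (rc.1 ++ [0], rc.2)) (acc, k)
    = (acc ++ pvRefRow w k row, k + (pvCnt row : Int)) := by
  rw [PySem.List.foldl_pyRange_zero_pyGetD' row ""
    (fun rc cell =>
      if cell = "$" ∨ cell = "*" then (rc.1 ++ [(PySem.List.pyGet? w rc.2).getD 0], rc.2 + 1)
      else (rc.1 ++ [0], rc.2)) (acc, k)]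
  exact pv_rowA w row acc k

theorem pv_gridA (w : List Int) (grid : List (List String)) :
    ∀ (acc : List (List Int)) (k : Int),
    grid.foldl (fun (st : List (List Int) × Int) row =>
      let inner := (PySem.List.pyRange 0 row.length 1).foldl
        (fun (rc : List Int × Int) c =>
          let cell := PySem.List.pyGetD row c ""
          if cell = "$" ∨ cell = "*" then (rc.1 ++ [(PySem.List.pyGet? w rc.2).getD 0], rc.2 + 1)
          else (rc.1 ++ [0], rc.2)) ([], st.2)
      (st.1 ++ [inner.1], inner.2)) (acc, k)
    = (acc ++ pvRef w k grid, k + ((grid.map pvCnt).sum : Int)) := by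
  induction grid with
  | nil => intro acc k; simp [pvRef]
  | cons row rest ih =>
    intro acc k
    rw [List.foldl_cons]
    simp only [pv_rowA' w row [] k, List.nil_append]
    rw [ih]
    simp [pvRef, List.append_assoc]
    ring

theorem pv_portA_eq (grid : List (List String)) (w : List Int) :
    calculate_grid_cost grid w = pvRef w 0 grid := by
  unfold calculate_grid_cost
  rw [PySem.List.foldl_pyRange_zero_pyGetD' grid []
    (fun (st : List (List Int) × Int) row =>
      let inner := (PySem.List.pyRange 0 row.length 1).foldl
        (fun (rc : List Int × Int) c =>
          let cell := PySem.List.pyGetD row c ""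
          if cell = "$" ∨ cell = "*" then (rc.1 ++ [(PySem.List.pyGet? w rc.2).getD 0], rc.2 + 1)
          else (rc.1 ++ [0], rc.2)) ([], st.2)
      (st.1 ++ [inner.1], inner.2)) ([], 0)]
  rw [pv_gridA w grid [] 0]
  simp

-- ---- B side: positions, the dict and the lookup pass also produce pvRef ----

theorem pv_mem_posCells {r : Int} {p : Int × Int} : ∀ {c0 : Int} {cells : List String},
    p ∈ pvPosCells r c0 cells → p.1 = r ∧ c0 ≤ p.2 := by
  intro c0 cells
  induction cells generalizing c0 with
  | nil => simp [pvPosCells]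
  | cons cell cs ih =>
    intro h
    by_cases hc : cell = "$" ∨ cell = "*" <;> simp [pvPosCells, hc] at h
    · rcases h with h | h
      · simp [h]
      · have := ih h; omega
    · have := ih h; omega

theorem pv_mem_pos {p : Int × Int} : ∀ {r0 : Int} {rows : List (List String)},
    p ∈ pvPos r0 rows → r0 ≤ p.1 := by
  intro r0 rows
  induction rows generalizing r0 with
  | nil => simp [pvPos]
  | cons row rest ih =>
    intro h
    simp [pvPos] at h
    rcases h with h | h
    · exact (pv_mem_posCells h).1 ▸ le_refl _
    · have := ih h; omega

theorem pv_nodup_posCells (r : Int) : ∀ (c0 : Int) (cells : List String),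
    (pvPosCells r c0 cells).Nodup := by
  intro c0 cells
  induction cells generalizing c0 with
  | nil => simp [pvPosCells]
  | cons cell cs ih =>
    by_cases hc : cell = "$" ∨ cell = "*" <;> simp [pvPosCells, hc]
    · refine ⟨fun h => ?_, ih _⟩
      have := (pv_mem_posCells h).2; omega
    · exact ih _

theorem pv_nodup_pos : ∀ (r0 : Int) (rows : List (List String)), (pvPos r0 rows).Nodup := by
  intro r0 rows
  induction rows generalizing r0 with
  | nil => simp [pvPos]
  | cons row rest ih =>
    rw [pvPos, List.nodup_append]
    refine ⟨pv_nodup_posCells _ _ _, ih _, ?_⟩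
    intro p hp q hq
    have h1 := (pv_mem_posCells hp).1
    have h2 := pv_mem_pos hq
    intro h; rw [h] at h1; omega

theorem pv_posCells_eq (r : Int) : ∀ (cells : List String) (c0 : Int),
    (PySem.List.enumerate cells c0).filterMap (fun p =>
      if p.2 = "$" ∨ p.2 = "*" then some (r, p.1) else none) = pvPosCells r c0 cells := by
  intro cells
  induction cells with
  | nil => intro c0; simp [PySem.List.enumerate_nil, pvPosCells]
  | cons cell cs ih =>
    intro c0
    rw [PySem.List.enumerate_cons, List.filterMap_cons]
    by_cases hc : cell = "$" ∨ cell = "*" <;> simp [hc, pvPosCells, ih]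

theorem pv_pos_eq : ∀ (rows : List (List String)) (r0 : Int),
    (PySem.List.enumerate rows r0).flatMap (fun q =>
      (PySem.List.enumerate q.2 0).filterMap (fun p =>
        if p.2 = "$" ∨ p.2 = "*" then some (q.1, p.1) else none)) = pvPos r0 rows := by
  intro rows
  induction rows with
  | nil => intro r0; simp [PySem.List.enumerate_nil, pvPos]
  | cons row rest ih =>
    intro r0
    rw [PySem.List.enumerate_cons, List.flatMap_cons, pvPos, ih, pv_posCells_eq]

theorem pv_length_posCells (r : Int) : ∀ (cells : List String) (c0 : Int),
    (pvPosCells r c0 cells).length = pvCnt cells := by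
  intro cells
  induction cells with
  | nil => intro c0; simp [pvPosCells, pvCnt]
  | cons cell cs ih =>
    intro c0
    by_cases hc : cell = "$" ∨ cell = "*" <;>
      simp [pvPosCells, hc, ih, pvCnt]

theorem pv_enum_cells (w : List Int) (r : Int) : ∀ (cells : List String) (c0 s : Int),
    (PySem.List.enumerate (pvPosCells r c0 cells) s).map
      (fun ip => (ip.2, pvWget w ip.1)) = pvSegCells w r c0 s cells := by
  intro cells
  induction cells with
  | nil => intro c0 s; simp [pvPosCells, pvSegCells, PySem.List.enumerate_nil]
  | cons cell cs ih =>
    intro c0 s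
    by_cases hc : cell = "$" ∨ cell = "*"
    · rw [pvPosCells, if_pos hc, PySem.List.enumerate_cons, List.map_cons, pvSegCells, if_pos hc, ih]
    · rw [pvPosCells, if_neg hc, pvSegCells, if_neg hc, ih]

theorem pv_enum_pos (w : List Int) : ∀ (rows : List (List String)) (r0 s : Int),
    (PySem.List.enumerate (pvPos r0 rows) s).map
      (fun ip => (ip.2, pvWget w ip.1)) = pvSeg w r0 s rows := by
  intro rows
  induction rows with
  | nil => intro r0 s; simp [pvPos, pvSeg, PySem.List.enumerate_nil]
  | cons row rest ih =>
    intro r0 s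
    rw [pvPos, PySem.List.enumerate_append, List.map_append, pvSeg, pv_enum_cells,
      pv_length_posCells, ih]

theorem pv_dict_eq (w : List Int) (grid : List (List String)) :
    (PySem.List.enumerate (pvPos 0 grid) 0).foldl
      (fun d ip => d.insert ip.2 ((PySem.List.pyGet? w ip.1).getD 0))
      PySem.Dict.empty = PySem.Dict.mk (pvSeg w 0 0 grid) := by
  apply PySem.Dict.ext
  rw [PySem.Dict.items_foldl_insert_fresh (PySem.List.enumerate (pvPos 0 grid) 0)
      (fun ip => ip.2) (fun ip => (PySem.List.pyGet? w ip.1).getD 0) PySem.Dict.empty]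
  · show PySem.Dict.empty.items ++ _ = _
    rw [show (PySem.Dict.empty : PySem.Dict (Int × Int) Int).items = [] from rfl, List.nil_append]
    exact pv_enum_pos w grid 0 0
  · intro a _; exact PySem.Dict.contains_empty _
  · rw [PySem.List.map_snd_enumerate]; exact pv_nodup_pos 0 grid

theorem pv_getD_mk_eq_lk : ∀ (l : List ((Int × Int) × Int)) (key : Int × Int),
    (PySem.Dict.mk l).getD key 0 = pvLk l key := by
  intro l
  induction l with
  | nil => intro key; rfl
  | cons q t ih =>
    intro key
    rw [PySem.Dict.getD_eq_get?_getD, PySem.Dict.get?_mk_cons, pvLk]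
    by_cases h : q.1 = key
    · simp [h]
    · simp [h, ← PySem.Dict.getD_eq_get?_getD, ih]

theorem pv_lk_skip : ∀ (l1 l2 : List ((Int × Int) × Int)) (key : Int × Int),
    (∀ q ∈ l1, q.1 ≠ key) → pvLk (l1 ++ l2) key = pvLk l2 key := by
  intro l1 l2 key h
  induction l1 with
  | nil => simp
  | cons q t ih =>
    rw [List.cons_append, pvLk, if_neg (h q (by simp))]
    exact ih (fun p hp => h p (by simp [hp]))

theorem pv_lk_absent : ∀ (l : List ((Int × Int) × Int)) (key : Int × Int),
    (∀ q ∈ l, q.1 ≠ key) → pvLk l key = 0 := by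
  intro l key h
  have := pv_lk_skip l [] key h
  simpa [pvLk] using this

theorem pv_mem_segCells {w : List Int} {r : Int} {q : (Int × Int) × Int} :
    ∀ {c0 k : Int} {cells : List String},
    q ∈ pvSegCells w r c0 k cells → q.1.1 = r ∧ c0 ≤ q.1.2 := by
  intro c0 k cells
  induction cells generalizing c0 k with
  | nil => simp [pvSegCells]
  | cons cell cs ih =>
    intro h
    by_cases hc : cell = "$" ∨ cell = "*" <;> simp [pvSegCells, hc] at h
    · rcases h with h | h
      · simp [h]
      · have := ih h; omega
    · have := ih h; omega

theorem pv_mem_seg {w : List Int} {q : (Int × Int) × Int} :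
    ∀ {r0 k : Int} {rows : List (List String)},
    q ∈ pvSeg w r0 k rows → r0 ≤ q.1.1 := by
  intro r0 k rows
  induction rows generalizing r0 k with
  | nil => simp [pvSeg]
  | cons row rest ih =>
    intro h
    simp [pvSeg] at h
    rcases h with h | h
    · exact (pv_mem_segCells h).1 ▸ le_refl _
    · have := ih h; omega

theorem pv_rowB (w : List Int) (r : Int) : ∀ (cells : List String) (c0 k : Int)
    (rest : List ((Int × Int) × Int)), (∀ q ∈ rest, q.1.1 ≠ r) →
    (PySem.List.pyRange c0 (c0 + (cells.length : Int)) 1).map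
      (fun c => pvLk (pvSegCells w r c0 k cells ++ rest) (r, c)) = pvRefRow w k cells := by
  intro cells
  induction cells with
  | nil => intro c0 k rest h; simp [pvRefRow]
  | cons cell cs ih =>
    intro c0 k rest h
    have heq : c0 + (((cell :: cs).length : Nat) : Int) = (c0 + 1) + ((cs.length : Nat) : Int) := by
      simp only [List.length_cons]; push_cast; ring
    have hsplit : PySem.List.pyRange c0 (c0 + ((cell :: cs).length : Int)) 1
        = c0 :: PySem.List.pyRange (c0 + 1) ((c0 + 1) + (cs.length : Int)) 1 := by
      rw [heq, PySem.List.pyRange_one_cons (by omega)]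
    rw [hsplit, List.map_cons]
    by_cases hc : cell = "$" ∨ cell = "*"
    · have hhead : pvLk (pvSegCells w r c0 k (cell :: cs) ++ rest) (r, c0) = pvWget w k := by
        rw [pvSegCells, if_pos hc, List.cons_append, pvLk, if_pos rfl]
      have htail : List.map (fun c => pvLk (pvSegCells w r c0 k (cell :: cs) ++ rest) (r, c))
          (PySem.List.pyRange (c0 + 1) ((c0 + 1) + (cs.length : Int)) 1)
          = List.map (fun c => pvLk (pvSegCells w r (c0 + 1) (k + 1) cs ++ rest) (r, c))
            (PySem.List.pyRange (c0 + 1) ((c0 + 1) + (cs.length : Int)) 1) := by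
        apply List.map_congr_left
        intro c hcm
        have hb := PySem.List.mem_pyRange_one.1 hcm
        rw [pvSegCells, if_pos hc, List.cons_append, pvLk, if_neg (by
          intro he
          have h2 : c0 = c := congrArg Prod.snd he
          omega)]
      rw [hhead, htail, ih (c0 + 1) (k + 1) rest h, pvRefRow, if_pos hc]
    · rw [pvSegCells, if_neg hc, ih (c0 + 1) k rest h, pvRefRow, if_neg hc]
      congr 1
      apply pv_lk_absent
      intro q hq
      rcases List.mem_append.1 hq with h1 | h2
      · have := pv_mem_segCells h1
        intro he; rw [he] at this; simp at this
      · intro he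
        exact (h q h2) (by rw [he])

theorem pv_gridB (w : List Int) : ∀ (rows : List (List String)) (r0 k : Int)
    (pre : List ((Int × Int) × Int)), (∀ q ∈ pre, q.1.1 < r0) →
    (PySem.List.enumerate rows r0).map (fun q =>
      (PySem.List.pyRange 0 (q.2.length : Int) 1).map
        (fun c => pvLk (pre ++ pvSeg w r0 k rows) (q.1, c))) = pvRef w k rows := by
  intro rows
  induction rows with
  | nil => intro r0 k pre hpre; simp [pvRef, PySem.List.enumerate_nil]
  | cons row rest ih =>
    intro r0 k pre hpre
    rw [PySem.List.enumerate_cons, List.map_cons, pvSeg, pvRef]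
    congr 1
    · have hskip : ∀ c : Int, pvLk (pre ++ (pvSegCells w r0 0 k row ++ pvSeg w (r0 + 1) (k + (pvCnt row : Int)) rest)) (r0, c)
          = pvLk (pvSegCells w r0 0 k row ++ pvSeg w (r0 + 1) (k + (pvCnt row : Int)) rest) (r0, c) := by
        intro c
        apply pv_lk_skip
        intro q hq
        have := hpre q hq
        intro he; rw [he] at this; simp at this
      calc List.map (fun c => pvLk (pre ++ (pvSegCells w r0 0 k row ++ pvSeg w (r0 + 1) (k + (pvCnt row : Int)) rest)) (r0, c))
            (PySem.List.pyRange 0 (row.length : Int) 1)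
          = List.map (fun c => pvLk (pvSegCells w r0 0 k row ++ pvSeg w (r0 + 1) (k + (pvCnt row : Int)) rest) (r0, c))
            (PySem.List.pyRange 0 (row.length : Int) 1) := List.map_congr_left (fun c _ => hskip c)
        _ = pvRefRow w k row := by
            have := pv_rowB w r0 row 0 k (pvSeg w (r0 + 1) (k + (pvCnt row : Int)) rest) (by
              intro q hq
              have := pv_mem_seg hq
              omega)
            simpa using this
    · have hfun : ∀ (q : Int × List String), q ∈ PySem.List.enumerate rest (r0 + 1) →
          (PySem.List.pyRange 0 (q.2.length : Int) 1).map
            (fun c => pvLk (pre ++ (pvSegCells w r0 0 k row ++ pvSeg w (r0 + 1) (k + (pvCnt row : Int)) rest)) (q.1, c))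
          = (PySem.List.pyRange 0 (q.2.length : Int) 1).map
            (fun c => pvLk ((pre ++ pvSegCells w r0 0 k row) ++ pvSeg w (r0 + 1) (k + (pvCnt row : Int)) rest) (q.1, c)) := by
        intro q _
        rw [List.append_assoc]
      rw [List.map_congr_left hfun]
      exact ih (r0 + 1) (k + (pvCnt row : Int)) (pre ++ pvSegCells w r0 0 k row) (by
        intro q hq
        rcases List.mem_append.1 hq with h1 | h2
        · have := hpre q h1; omega
        · have := (pv_mem_segCells h2).1; omega)

theorem pv_portB_eq (grid : List (List String)) (w : List Int) :
    calculate_grid_cost_alt grid w = pvRef w 0 grid := by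
  unfold calculate_grid_cost_alt
  dsimp only
  rw [pv_pos_eq, pv_dict_eq]
  have hmk : ∀ (q : Int × List String), q ∈ PySem.List.enumerate grid 0 →
      (PySem.List.pyRange 0 (q.2.length : Int) 1).map
        (fun c => (PySem.Dict.mk (pvSeg w 0 0 grid)).getD (q.1, c) 0)
      = (PySem.List.pyRange 0 (q.2.length : Int) 1).map
        (fun c => pvLk ([] ++ pvSeg w 0 0 grid) (q.1, c)) := by
    intro q _
    simp only [pv_getD_mk_eq_lk, List.nil_append]
  rw [List.map_congr_left hmk]
  exact pv_gridB w grid 0 0 [] (by simp)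

-- ===== VERDICT (by name: the statement is the Claim_ definition above) =====
theorem calculate_grid_cost_spec : Claim_equal_calculate_grid_cost := by
  intro grid w _ _
  unfold Spec_calculate_grid_cost
  rw [pv_portA_eq, pv_portB_eq]
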